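-- pv_equiv track=rewrite | github.com/ngamelzz/Spam_Detection | Filter chi square/modulku/praproses.py | normalAt
-- ===== SOURCE A (Python) =====
-- def normalAt(str):
--     # ok = gantiKarakter(str)
--     ok = str.lower()
--     n_w = []
--     for i in range(len(ok)):
--         if ok[i] == "@" and i !=0 and ok[i-1] !=" ":
--             n_w.append(" @")
--         else:
--             n_w.append(ok[i])
--     return "".join(n_w)
-- ===== SOURCE B (Python) =====
-- def normalAt(str):
--     # Split on '@' and rejoin: each separator is re-inserted as '@' or ' @'
--     # depending on the tail of the output built so far.
--     parts = str.lower().split("@")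
--     out = parts[0]
--     for p in parts[1:]:
--         if not out or out[-1] == " ":
--             out += "@" + p
--         else:
--             out += " @" + p
--     return out
-- ===== Notes on version B (the rewrite author's own statement) =====
-- stated objective: faster
-- what changed: Instead of scanning characters with an i-1 lookback, B splits the lowered string on the separator character and rejoins the pieces, choosing each re-inserted separator's spacing from the last character of the output built so far.
import Mathlib
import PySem

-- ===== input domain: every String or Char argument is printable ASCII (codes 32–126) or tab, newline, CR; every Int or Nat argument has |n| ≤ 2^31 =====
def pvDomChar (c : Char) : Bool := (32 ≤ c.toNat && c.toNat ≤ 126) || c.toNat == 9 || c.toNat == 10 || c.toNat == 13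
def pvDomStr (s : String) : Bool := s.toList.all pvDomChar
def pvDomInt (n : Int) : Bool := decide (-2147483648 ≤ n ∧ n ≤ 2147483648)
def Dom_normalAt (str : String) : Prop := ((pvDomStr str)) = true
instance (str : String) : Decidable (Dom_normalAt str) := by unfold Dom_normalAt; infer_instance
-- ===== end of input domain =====

-- B rejoins the '@'-split pieces of the lowered string, choosing '@' or ' @' per boundary
-- from the tail of the output built so far, instead of A's per-character i-1 lookback loop.

-- ===== PORT A =====
def normalAt (str : String) : String :=
  String.join ((PySem.List.pyRange 0 (PySem.Str.len (PySem.Str.lower str)) 1).foldl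
    (fun acc i =>
      if PySem.List.pyGetD (PySem.Str.lower str).toList i ' ' = '@' ∧ i ≠ 0 ∧
          PySem.List.pyGetD (PySem.Str.lower str).toList (i - 1) ' ' ≠ ' '
      then acc ++ [" @"]
      else acc ++ [String.ofList [PySem.List.pyGetD (PySem.Str.lower str).toList i ' ']]) [])

-- ===== PORT B =====
-- str.split("@") with a nonempty separator → PySem.Chars.splitOn (exact); the fold builds
-- out exactly as Source B's loop over parts[1:] does (out[-1] == " " → getLast? = some ' ').
def normalAt_alt (str : String) : String :=
  match PySem.Chars.splitOn (PySem.Str.lower str).toList ['@'] with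
  | [] => ""   -- unreachable: str.split never returns an empty list
  | h :: t =>
    String.ofList (t.foldl
      (fun out p =>
        if out = [] ∨ out.getLast? = some ' '
        then out ++ '@' :: p
        else out ++ ' ' :: '@' :: p) h)

-- ===== PRECONDITION & SPEC =====
def Spec_normalAt (str : String) (out : String) : Prop := out = normalAt_alt str
instance (str : String) (out : String) : Decidable (Spec_normalAt str out) := by unfold Spec_normalAt; infer_instance

-- ===== CLAIM (what is proved, stated in full; the proofs are below) =====
def Claim_equal_normalAt : Prop := ∀ (str : String), Dom_normalAt str → Spec_normalAt str (normalAt str)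

-- ===== LEMMAS AND PROOFS =====
def splitCh : List Char → List Char → List (List Char)
  | pre, [] => [pre]
  | pre, c :: rest => if c = '@' then pre :: splitCh [] rest else splitCh (pre ++ [c]) rest

theorem go_spec (fuel : Nat) : ∀ (l cur : List Char) (acc : List (List Char)), l.length < fuel →
    PySem.Chars.splitOn.go ['@'] fuel l cur acc = acc.reverse ++ splitCh cur.reverse l := by
  induction fuel with
  | zero => intro l cur acc h; omega
  | succ f ih =>
    intro l cur acc h
    cases l with
    | nil => simp [PySem.Chars.splitOn.go, splitCh]
    | cons c rest =>
      rw [PySem.Chars.splitOn.go]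
      by_cases hc : c = '@'
      · subst hc
        have hpre : List.isPrefixOf ['@'] ('@' :: rest) = true := by simp [List.isPrefixOf]
        rw [if_pos hpre]
        simp only [List.length_cons] at h
        rw [ih _ _ _ (by simpa using Nat.lt_of_succ_lt_succ (by omega))]
        simp [splitCh]
      · have hpre : List.isPrefixOf ['@'] (c :: rest) = false := by
          simp [List.isPrefixOf]; exact fun h' => hc h'.symm
        rw [if_neg (by simp [hpre])]
        simp only [List.length_cons] at h
        rw [ih _ _ _ (by omega)]
        simp [splitCh, hc]

theorem splitOn_eq (l : List Char) : PySem.Chars.splitOn l ['@'] = splitCh [] l := by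
  rw [PySem.Chars.splitOn, go_spec _ _ _ _ (by omega)]
  simp

def insAt : Char → List Char → List Char
  | _, [] => []
  | prev, c :: cs => (if c = '@' ∧ prev ≠ ' ' then [' ', '@'] else [c]) ++ insAt c cs

theorem getLastD_append (x y : List Char) (d : Char) :
    (x ++ y).getLastD d = y.getLastD (x.getLastD d) := by
  cases y with
  | nil => simp
  | cons a ys => simp [List.getLastD_eq_getLast?, List.getLast?_append]

theorem insAt_no_at (a : List Char) : ∀ (prev : Char) (l' : List Char), '@' ∉ a →
    insAt prev (a ++ l') = a ++ insAt (a.getLastD prev) l' := by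
  induction a with
  | nil => intro prev l' _; simp
  | cons x xs ih =>
    intro prev l' ha
    have hx : ¬ x = '@' := fun h => ha (by simp [h])
    have hxs : '@' ∉ xs := fun h => ha (List.mem_cons_of_mem _ h)
    simp only [List.cons_append, insAt]
    rw [if_neg (by tauto), ih x l' hxs]
    have : (x :: xs).getLast?.getD prev = xs.getLast?.getD x := by
      cases xs with
      | nil => simp
      | cons y ys =>
        rw [List.getLast?_cons_cons]
        cases h : (y :: ys).getLast? with
        | none => simp [List.getLast?_eq_none_iff] at h
        | some z => simp
    simp [this]

theorem cond_iff (out : List Char) :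
    (out = [] ∨ out.getLast? = some ' ') ↔ out.getLastD ' ' = ' ' := by
  cases h : out.getLast? with
  | none => simp [List.getLast?_eq_none_iff] at h; simp [h, List.getLastD_eq_getLast?]
  | some z =>
    have : out ≠ [] := by rintro rfl; simp at h
    simp [List.getLastD_eq_getLast?, h, this]

theorem step_eq (out cur : List Char) :
    (if out = [] ∨ out.getLast? = some ' ' then out ++ '@' :: cur else out ++ ' ' :: '@' :: cur)
    = out ++ (if out.getLastD ' ' = ' ' then ['@'] else [' ', '@']) ++ cur := by
  by_cases h : out = [] ∨ out.getLast? = some ' '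
  · rw [if_pos h, if_pos ((cond_iff out).mp h)]; simp
  · rw [if_neg h, if_neg (fun hh => h ((cond_iff out).mpr hh))]; simp

theorem insAt_at (prev : Char) (X : List Char) :
    insAt prev ('@' :: X)
    = (if prev = ' ' then ['@'] else [' ', '@']) ++ insAt '@' X := by
  by_cases h : prev = ' ' <;> simp [insAt, h]

theorem fold_full (l : List Char) : ∀ (cur out : List Char), '@' ∉ cur →
    List.foldl (fun out p =>
        if out = [] ∨ out.getLast? = some ' '
        then out ++ '@' :: p
        else out ++ ' ' :: '@' :: p) out (splitCh cur l)
    = out ++ insAt (out.getLastD ' ') ('@' :: (cur ++ l)) := by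
  induction l with
  | nil =>
    intro cur out hcur
    simp only [splitCh, List.foldl_cons, List.foldl_nil, step_eq]
    rw [insAt_at, insAt_no_at cur '@' [] hcur]
    simp [insAt]
  | cons c rest ih =>
    intro cur out hcur
    by_cases hc : c = '@'
    · subst hc
      rw [splitCh, if_pos rfl, List.foldl_cons]
      rw [step_eq out cur, ih [] _ (by simp)]
      have hlast : ((out ++ if out.getLastD ' ' = ' ' then ['@'] else [' ', '@']) ++ cur).getLastD ' '
          = cur.getLastD '@' := by
        rw [List.append_assoc, getLastD_append, getLastD_append]
        split_ifs <;> simp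
      rw [List.nil_append, hlast, insAt_at (cur.getLastD '@') rest,
          insAt_at (out.getLastD ' ') (cur ++ '@' :: rest),
          insAt_no_at cur '@' ('@' :: rest) hcur,
          insAt_at (cur.getLastD '@') rest]
      simp
    · simp only [splitCh, if_neg hc]
      rw [ih (cur ++ [c]) out (by simp [hcur]; exact fun h => hc h.symm)]
      rw [insAt_at, insAt_at, insAt_no_at cur '@' (c :: rest) hcur,
          insAt_no_at (cur ++ [c]) '@' rest (by simp [hcur]; exact fun h => hc h.symm)]
      have : insAt (cur.getLastD '@') (c :: rest)
          = [c] ++ insAt c rest := by simp [insAt, hc]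
      rw [this]
      have : (cur ++ [c]).getLastD '@' = c := by rw [getLastD_append]; simp
      rw [this]
      simp

theorem fold_head (l : List Char) : ∀ (cur out : List Char), '@' ∉ cur →
    (match splitCh cur l with
      | [] => ([] : List Char)
      | h :: t => List.foldl (fun out p =>
          if out = [] ∨ out.getLast? = some ' '
          then out ++ '@' :: p
          else out ++ ' ' :: '@' :: p) (out ++ h) t)
    = out ++ cur ++ insAt ((out ++ cur).getLastD ' ') l := by
  induction l with
  | nil => intro cur out _; simp [splitCh, insAt]
  | cons c rest ih =>
    intro cur out hcur
    by_cases hc : c = '@'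
    · subst hc
      rw [splitCh, if_pos rfl]
      simp only
      rw [fold_full rest [] (out ++ cur) (by simp)]
      simp [insAt_at]
    · rw [splitCh, if_neg hc]
      rw [ih (cur ++ [c]) out (by simp [hcur]; exact fun h => hc h.symm)]
      have h1 : insAt ((out ++ cur).getLastD ' ') (c :: rest) = [c] ++ insAt c rest := by
        simp [insAt, hc]
      have h2 : (out ++ (cur ++ [c])).getLastD ' ' = c := by rw [getLastD_append]; simp
      rw [h1, h2]
      simp

theorem join_zip_eq (l : List Char) : ∀ (prev : Char),
    (String.join (((prev :: l).zip l).map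
      (fun pc => if pc.2 = '@' ∧ pc.1 ≠ ' ' then " @" else String.ofList [pc.2]))).toList
    = insAt prev l := by
  induction l with
  | nil => intro prev; rfl
  | cons c cs ih =>
    intro prev
    have hz : (prev :: c :: cs).zip (c :: cs) = (prev, c) :: ((c :: cs).zip cs) := rfl
    rw [hz, List.map_cons]
    simp only [String.toList_join, List.map_cons, List.flatten_cons] at ih ⊢
    rw [insAt]
    by_cases h : c = '@' ∧ prev ≠ ' '
    · rw [if_pos h, if_pos h]
      have : (" @" : String).toList = [' ', '@'] := by decide
      rw [this, ih c]
    · rw [if_neg h, if_neg h]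
      simp only [String.toList_ofList]
      rw [ih c]

theorem splitCh_ne_nil (l : List Char) : ∀ (pre : List Char), splitCh pre l ≠ [] := by
  induction l with
  | nil => intro pre; simp [splitCh]
  | cons c rest ih =>
    intro pre
    rw [splitCh]
    by_cases hc : c = '@'
    · rw [if_pos hc]; simp
    · rw [if_neg hc]; exact ih _

-- A's per-index map over the lowered list, as a zip over (prev, cur) pairs.
theorem normalAt_key (l : List Char) :
    (PySem.List.pyRange 0 (l.length : Int) 1).map
      (fun i =>
        if PySem.List.pyGetD l i ' ' = '@' ∧ i ≠ 0 ∧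
            PySem.List.pyGetD l (i - 1) ' ' ≠ ' '
        then " @"
        else String.ofList [PySem.List.pyGetD l i ' '])
    = ((' ' :: l).zip l).map
      (fun pc => if pc.2 = '@' ∧ pc.1 ≠ ' ' then " @" else String.ofList [pc.2]) := by
  have hlen : (PySem.List.pyRange 0 (l.length : Int) 1).length = l.length := by
    simp [PySem.List.length_pyRange_one]
  apply List.ext_getElem
  · simp [hlen]
  · intro k hk1 hk2
    have hk : k < l.length := by simpa [hlen] using hk1
    have hk' : k < (PySem.List.pyRange 0 (l.length : Int) 1).length := by omega
    have hidx : (PySem.List.pyRange 0 (l.length : Int) 1)[k]'hk' = (k : Int) := by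
      rw [PySem.List.getElem_pyRange_one]; omega
    have hkz : k < ((' ' :: l).zip l).length := by simp; omega
    simp only [List.getElem_map, hidx]
    have hzip : ((' ' :: l).zip l)[k]'hkz = ((' ' :: l)[k]'(by simp; omega), l[k]) := by
      simp [List.getElem_zip]
    rw [hzip]
    have hcur : PySem.List.pyGetD l (k : Int) ' ' = l[k] := by
      rw [PySem.List.pyGetD_natCast]; exact List.getD_eq_getElem l ' ' hk
    rcases Nat.eq_zero_or_pos k with hk0 | hkpos
    · subst hk0
      rw [hcur]
      simp
    · have hne : (k : Int) ≠ 0 := by omega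
      have hne' : ¬ k = 0 := by omega
      have hprev : PySem.List.pyGetD l ((k : Int) - 1) ' ' = l[k - 1]'(by omega) := by
        have h1 : ((k : Int) - 1) = ((k - 1 : Nat) : Int) := by omega
        rw [h1, PySem.List.pyGetD_natCast]
        exact List.getD_eq_getElem l ' ' (by omega)
      have hcons : (' ' :: l)[k]'(by simp; omega) = l[k - 1]'(by omega) := by
        rcases k with _ | k
        · omega
        · simp
      rw [hcur, hprev, hcons]
      simp [hne']

-- ===== VERDICT (by name: the statement is the Claim_ definition above) =====
set_option maxHeartbeats 1000000 in
theorem normalAt_spec : Claim_equal_normalAt := by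
  intro str _
  unfold Spec_normalAt normalAt normalAt_alt
  have hfun : (fun (acc : List String) (i : Int) =>
      if PySem.List.pyGetD (PySem.Str.lower str).toList i ' ' = '@' ∧ i ≠ 0 ∧
          PySem.List.pyGetD (PySem.Str.lower str).toList (i - 1) ' ' ≠ ' '
      then acc ++ [" @"]
      else acc ++ [String.ofList [PySem.List.pyGetD (PySem.Str.lower str).toList i ' ']])
    = (fun (acc : List String) (i : Int) => acc ++
        [if PySem.List.pyGetD (PySem.Str.lower str).toList i ' ' = '@' ∧ i ≠ 0 ∧
            PySem.List.pyGetD (PySem.Str.lower str).toList (i - 1) ' ' ≠ ' '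
         then " @"
         else String.ofList [PySem.List.pyGetD (PySem.Str.lower str).toList i ' ']]) := by
    funext acc i; split_ifs <;> rfl
  rw [hfun, PySem.List.foldl_append_singleton_eq_map]
  have hlen : PySem.Str.len (PySem.Str.lower str) = (((PySem.Str.lower str).toList.length : Int)) := by
    simp
  rw [List.nil_append, hlen, normalAt_key, splitOn_eq]
  cases hsp : splitCh [] (PySem.Str.lower str).toList with
  | nil => exact absurd hsp (splitCh_ne_nil _ [])
  | cons h t =>
    apply String.toList_inj.mp
    rw [join_zip_eq, String.toList_ofList]
    have hmain := fold_head (PySem.Str.lower str).toList [] [] (by simp)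
    rw [hsp] at hmain
    simpa using hmain.symm
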